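-- pv_equiv track=rewrite | github.com/MARUCIE/cognebula-enterprise | src/cognebula.py | build_line_index
-- ===== SOURCE A (Python) =====
-- def build_line_index(text: str) -> list[int]:
--     """Pre-compute newline positions for O(log n) line lookups."""
--     positions = [0]
--     idx = 0
--     while True:
--         idx = text.find("\n", idx)
--         if idx == -1:
--             break
--         positions.append(idx + 1)
--         idx += 1
--     return positions
-- ===== SOURCE B (Python) =====
-- def build_line_index(text: str) -> list[int]:
--     """Pre-compute newline positions for O(log n) line lookups."""
--     return [0] + [i + 1 for i, ch in enumerate(text) if ch == "\n"]
-- ===== Notes on version B (the rewrite author's own statement) =====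
-- stated objective: simpler
-- what changed: Replaces the while-loop of repeated str.find calls with index bookkeeping by a single comprehension over enumerate(text) that collects i+1 for every newline character.
import Mathlib
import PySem

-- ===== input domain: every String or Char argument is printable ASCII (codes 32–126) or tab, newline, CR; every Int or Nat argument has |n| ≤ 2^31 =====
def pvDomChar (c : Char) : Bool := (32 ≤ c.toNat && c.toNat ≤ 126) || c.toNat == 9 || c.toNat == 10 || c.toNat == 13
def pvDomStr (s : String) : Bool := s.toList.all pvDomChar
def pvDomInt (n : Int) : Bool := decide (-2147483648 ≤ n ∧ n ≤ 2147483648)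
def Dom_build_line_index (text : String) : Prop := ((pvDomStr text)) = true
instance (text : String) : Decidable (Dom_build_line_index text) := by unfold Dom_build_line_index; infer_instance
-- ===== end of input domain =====

-- B replaces A's while-loop of repeated str.find calls by a single comprehension
-- over enumerate(text); objective: simpler.


-- ===== PORT A =====
-- the 'while True' loop; fuel (length+1, enough for every newline plus the final
-- failing find) only makes the same computation total
def buildLoopA (text : String) : Nat → Int → List Int → List Int
  | 0, _, positions => positions
  | fuel + 1, idx, positions =>
    let j := PySem.Str.findFrom text "\n" idx
    if j = -1 then positions
    else buildLoopA text fuel (j + 1) (positions ++ [j + 1])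

def build_line_index (text : String) : List Int :=
  buildLoopA text (text.toList.length + 1) 0 [0]

-- ===== PORT B =====
def build_line_index_alt (text : String) : List Int :=
  0 :: ((PySem.List.enumerate text.toList 0).filter (fun p => p.2 == '\n')).map
      (fun p => p.1 + 1)

-- ===== PRECONDITION & SPEC =====
def Spec_build_line_index (text : String) (out : List Int) : Prop := out = build_line_index_alt text
instance (text : String) (out : List Int) : Decidable (Spec_build_line_index text out) := by unfold Spec_build_line_index; infer_instance

-- ===== CLAIM (what is proved, stated in full; the proofs are below) =====
def Claim_equal_build_line_index : Prop := ∀ (text : String), Dom_build_line_index text → Spec_build_line_index text (build_line_index text)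

-- ===== LEMMAS AND PROOFS =====

-- B's comprehension, generalized over the scanned list and the enumerate start
def btail (l : List Char) (s : Int) : List Int :=
  ((PySem.List.enumerate l s).filter (fun p => p.2 == '\n')).map (fun p => p.1 + 1)

theorem btail_cons (c : Char) (t : List Char) (s : Int) :
    btail (c :: t) s = if c = '\n' then (s + 1) :: btail t (s + 1) else btail t (s + 1) := by
  by_cases h : c = '\n' <;> simp [btail, PySem.List.enumerate, h]

theorem btail_append (l₁ l₂ : List Char) (s : Int) :
    btail (l₁ ++ l₂) s = btail l₁ s ++ btail l₂ (s + l₁.length) := by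
  induction l₁ generalizing s with
  | nil => simp [btail]
  | cons c t ih =>
      rw [List.cons_append, btail_cons, btail_cons, ih]
      have hoff : (s + 1) + (t.length : Int) = s + ((c :: t).length : Int) := by
        push_cast [List.length_cons]; ring
      by_cases h : c = '\n' <;> simp [h, hoff]

theorem btail_of_not_mem (l : List Char) (s : Int) (h : '\n' ∉ l) : btail l s = [] := by
  induction l generalizing s with
  | nil => rfl
  | cons c t ih =>
      simp only [List.mem_cons, not_or] at h
      rw [btail_cons, if_neg (fun hc => h.1 hc.symm), ih _ h.2]

theorem singleton_prefix_iff (l : List Char) :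
    ['\n'] <+: l ↔ l.head? = some '\n' := by
  cases l with
  | nil => simp
  | cons c t => simp [List.cons_prefix_cons, eq_comm]

theorem aloop_eq (text : String) (fuel : Nat) : ∀ (k : Nat) (acc : List Int),
    k ≤ text.toList.length → List.count '\n' (text.toList.drop k) < fuel →
    buildLoopA text fuel ↑k acc = acc ++ btail (text.toList.drop k) ↑k := by
  induction fuel with
  | zero => intro k acc _ h; omega
  | succ fuel ih =>
      intro k acc hk hc
      set cs := text.toList with hcs
      set d := cs.drop k with hd
      have hfind : PySem.Str.findFrom text "\n" ↑k =
          (if PySem.Chars.find d ['\n'] = -1 then -1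
           else ↑k + PySem.Chars.find d ['\n']) := by
        rw [PySem.Str.findFrom_eq]
        have := PySem.Chars.findFrom_natCast text.toList ("\n".toList) k hk
        simpa using this
      show buildLoopA text (fuel + 1) ↑k acc = acc ++ btail d ↑k
      rw [buildLoopA]
      simp only [hfind]
      by_cases h : PySem.Chars.find d ['\n'] = -1
      · rw [if_pos h, if_pos rfl]
        have hmem : '\n' ∉ d := by
          intro hm
          have hinf : ['\n'] <:+: d := by
            obtain ⟨l₁, l₂, he⟩ := List.mem_iff_append.mp hm
            exact ⟨l₁, l₂, by simp [he]⟩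
          exact (PySem.Chars.find_eq_neg_one_iff d ['\n']).mp h hinf
        rw [btail_of_not_mem d _ hmem, List.append_nil]
      · rw [if_neg h]
        have hge : 0 ≤ PySem.Chars.find d ['\n'] := by
          have := PySem.Chars.neg_one_le_find d ['\n']
          omega
        obtain ⟨hpre, hmin⟩ := PySem.Chars.find_spec hge
        set f : Nat := (PySem.Chars.find d ['\n']).toNat with hf
        have hfcast : PySem.Chars.find d ['\n'] = (f : Int) := by omega
        have hne : ¬ ((↑k + PySem.Chars.find d ['\n'] : Int) = -1) := by omega
        rw [if_neg hne, hfcast]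
        have hfle : f ≤ d.length := by
          have := PySem.Chars.find_le_length d ['\n']
          omega
        have hheadf : d[f]? = some '\n' := by
          have h' := (singleton_prefix_iff _).mp hpre
          rwa [List.head?_drop] at h'
        have hflt : f < d.length := by
          rcases Nat.lt_or_ge f d.length with h' | h'
          · exact h'
          · rw [List.getElem?_eq_none (by omega)] at hheadf; simp at hheadf
        have hgf : d[f] = '\n' := by
          rw [List.getElem?_eq_getElem hflt] at hheadf
          simpa using hheadf
        have hrest : d.drop f = '\n' :: d.drop (f + 1) := by
          rw [List.drop_eq_getElem_cons hflt, hgf]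
        have hnot : '\n' ∉ d.take f := by
          intro hm
          obtain ⟨i, hi, hgi⟩ := List.mem_iff_getElem.mp hm
          have hil : i < f ∧ i < d.length := by
            simp [List.length_take] at hi; omega
          apply hmin i hil.1
          rw [singleton_prefix_iff, List.head?_drop,
            List.getElem?_eq_getElem hil.2]
          rw [List.getElem_take] at hgi
          simp [hgi]
        have hsplit : btail d ↑k = ((k : Int) + f + 1) :: btail (d.drop (f + 1)) ((k : Int) + f + 1) := by
          conv_lhs => rw [← List.take_append_drop f d]
          rw [btail_append, btail_of_not_mem _ _ hnot, List.nil_append,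
            List.length_take, Nat.min_eq_left hfle, hrest, btail_cons, if_pos rfl]
        have hdlen : d.length = cs.length - k := by simp [hd]
        have hk1 : k + f + 1 ≤ cs.length := by omega
        have hdd : cs.drop (k + f + 1) = d.drop (f + 1) := by
          rw [hd, List.drop_drop, Nat.add_assoc]
        have hcount : List.count '\n' (cs.drop (k + f + 1)) < fuel := by
          have h2 : List.count '\n' d =
              List.count '\n' (d.take f) + List.count '\n' (d.drop f) := by
            conv_lhs => rw [← List.take_append_drop f d]
            rw [List.count_append]
          have h3 : List.count '\n' (d.take f) = 0 := List.count_eq_zero.mpr hnot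
          have h4 : List.count '\n' (d.drop f) = 1 + List.count '\n' (d.drop (f + 1)) := by
            rw [hrest, List.count_cons]; simp [Nat.add_comm]
          rw [hdd]; omega
        have harg : ((k : Int) + f + 1) = ((k + f + 1 : Nat) : Int) := by push_cast; ring
        rw [harg, ih (k + f + 1) (acc ++ [((k + f + 1 : Nat) : Int)]) hk1 hcount,
          hdd, hsplit, harg]
        simp [List.append_assoc]

-- ===== VERDICT (by name: the statement is the Claim_ definition above) =====
theorem build_line_index_spec : Claim_equal_build_line_index := by
  intro text _
  unfold Spec_build_line_index build_line_index build_line_index_alt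
  have hcnt : List.count '\n' (text.toList.drop 0) < text.toList.length + 1 := by
    rw [List.drop_zero]
    exact Nat.lt_succ_of_le (List.count_le_length)
  have h := aloop_eq text (text.toList.length + 1) 0 [0] (Nat.zero_le _) hcnt
  simpa [btail] using h
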